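-- pv_equiv track=rewrite | github.com/SocialYjj/clash-sub-merger | server.py | split_template
-- ===== SOURCE A (Python) =====
-- from typing import Optional, Tuple, Dict, List
--
-- def split_template(full_content: str) -> Tuple[str, str]:
--     lines = full_content.splitlines(keepends=True)
--     header_lines, suffix_lines = [], []
--     state = 0
--     for line in lines:
--         stripped = line.strip()
--         if state == 0:
--             if stripped.startswith('proxies:') or stripped.startswith('proxy-groups:'):
--                 state = 1
--                 continue
--             header_lines.append(line)
--         elif state == 1:
--             if any(stripped.startswith(k) for k in ['rules:', 'rule-providers:', 'script:', 'url-rewrite:']):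
--                 state = 2
--                 suffix_lines.append(line)
--         elif state == 2:
--             suffix_lines.append(line)
--     return "".join(header_lines).strip(), "".join(suffix_lines).strip()
-- ===== SOURCE B (Python) =====
-- def split_template(full_content):
--     lines = full_content.splitlines(keepends=True)
--
--     def is_proxies(l):
--         s = l.strip()
--         return s.startswith('proxies:') or s.startswith('proxy-groups:')
--
--     def is_suffix(l):
--         s = l.strip()
--         return any(s.startswith(k) for k in ('rules:', 'rule-providers:', 'script:', 'url-rewrite:'))
--
--     p = next((i for i, l in enumerate(lines) if is_proxies(l)), None)
--     if p is None:
--         return full_content.strip(), ''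
--     header = ''.join(lines[:p])
--     q = next((i for i, l in enumerate(lines[p + 1:]) if is_suffix(l)), None)
--     suffix = '' if q is None else ''.join(lines[p + 1 + q:])
--     return header.strip(), suffix.strip()
-- ===== Notes on version B (the rewrite author's own statement) =====
-- stated objective: simpler
-- what changed: Replaced A's three-state accumulate/discard loop over the lines by boundary finding (index of the first proxies/proxy-groups marker, then the first suffix marker after it) plus slicing and joining.
import Mathlib
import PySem

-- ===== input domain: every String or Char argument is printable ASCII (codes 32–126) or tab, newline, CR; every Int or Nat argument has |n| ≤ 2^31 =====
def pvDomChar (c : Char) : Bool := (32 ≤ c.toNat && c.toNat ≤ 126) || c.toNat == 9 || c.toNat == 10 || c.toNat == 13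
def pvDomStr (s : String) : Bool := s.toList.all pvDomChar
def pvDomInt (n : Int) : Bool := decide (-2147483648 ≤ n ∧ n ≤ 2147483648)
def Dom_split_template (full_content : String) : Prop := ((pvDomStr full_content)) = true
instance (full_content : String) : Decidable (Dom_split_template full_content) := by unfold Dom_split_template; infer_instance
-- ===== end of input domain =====

-- B replaces A's three-state accumulate/discard machine by boundary finding plus slicing (objective: simpler; same O(n) cost).

-- ===== PORT A =====
-- hand port of str.splitlines(keepends=True): exact on the Dom alphabet, where the
-- only line breaks are '\n', '\r' and '\r\n' (acc holds the current line reversed)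
def pvSlk : List Char → List Char → List (List Char)
  | [], acc => if acc = [] then [] else [acc.reverse]
  | '\n' :: rest, acc => (acc.reverse ++ ['\n']) :: pvSlk rest []
  | '\r' :: '\n' :: rest, acc => (acc.reverse ++ ['\r', '\n']) :: pvSlk rest []
  | '\r' :: rest, acc => (acc.reverse ++ ['\r']) :: pvSlk rest []
  | c :: rest, acc => pvSlk rest (c :: acc)

-- the body of A's for-loop: state = (header_lines, suffix_lines, state)
def pvStepA (acc : List (List Char) × List (List Char) × Nat) (line : List Char) :
    List (List Char) × List (List Char) × Nat :=
  let stripped := PySem.Chars.strip line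
  if acc.2.2 = 0 then
    if PySem.Chars.startswith stripped "proxies:".toList ||
       PySem.Chars.startswith stripped "proxy-groups:".toList then
      (acc.1, acc.2.1, 1)
    else (acc.1 ++ [line], acc.2.1, acc.2.2)
  else if acc.2.2 = 1 then
    if ["rules:".toList, "rule-providers:".toList, "script:".toList, "url-rewrite:".toList].any
        (fun k => PySem.Chars.startswith stripped k) then
      (acc.1, acc.2.1 ++ [line], 2)
    else acc
  else (acc.1, acc.2.1 ++ [line], acc.2.2)

def split_template (full_content : String) : String × String :=
  let lines := pvSlk full_content.toList []
  let r := lines.foldl pvStepA ([], [], 0)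
  (String.ofList (PySem.Chars.strip (PySem.Chars.join [] r.1)),
   String.ofList (PySem.Chars.strip (PySem.Chars.join [] r.2.1)))

-- ===== PORT B =====
def pvIsM1 (l : List Char) : Bool :=
  let s := PySem.Chars.strip l
  PySem.Chars.startswith s "proxies:".toList || PySem.Chars.startswith s "proxy-groups:".toList

def pvIsM2 (l : List Char) : Bool :=
  let s := PySem.Chars.strip l
  ["rules:".toList, "rule-providers:".toList, "script:".toList, "url-rewrite:".toList].any
    (fun k => PySem.Chars.startswith s k)

def split_template_alt (full_content : String) : String × String :=
  let lines := pvSlk full_content.toList []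
  match lines.findIdx? pvIsM1 with
  | none => (String.ofList (PySem.Chars.strip full_content.toList), "")
  | some p =>
    let header := PySem.Chars.join [] (lines.take p)
    let suffix :=
      match (lines.drop (p + 1)).findIdx? pvIsM2 with
      | none => ([] : List Char)
      | some q => PySem.Chars.join [] (lines.drop (p + 1 + q))
    (String.ofList (PySem.Chars.strip header), String.ofList (PySem.Chars.strip suffix))

-- ===== PRECONDITION & SPEC =====
def Spec_split_template (full_content : String) (out : String × String) : Prop := out = split_template_alt full_content
instance (full_content : String) (out : String × String) : Decidable (Spec_split_template full_content out) := by unfold Spec_split_template; infer_instance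

-- ===== CLAIM (what is proved, stated in full; the proofs are below) =====
def Claim_equal_split_template : Prop := ∀ (full_content : String), Dom_split_template full_content → Spec_split_template full_content (split_template full_content)

-- ===== LEMMAS AND PROOFS =====

lemma pvJoin_nil_eq_flatten (ls : List (List Char)) : PySem.Chars.join [] ls = ls.flatten := by
  induction ls with
  | nil => simp [PySem.Chars.join_nil]
  | cons a t ih =>
    cases t with
    | nil => simp [PySem.Chars.join_singleton]
    | cons b u => simp [PySem.Chars.join_cons_cons, ih]

lemma pvSlk_flatten (cs acc : List Char) : (pvSlk cs acc).flatten = acc.reverse ++ cs := by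
  induction cs, acc using pvSlk.induct <;> simp [pvSlk, *]

-- pvStepA with its two tests written through B's predicates (same Booleans)
lemma pvStepA_eq (acc : List (List Char) × List (List Char) × Nat) (line : List Char) :
    pvStepA acc line =
      if acc.2.2 = 0 then
        if pvIsM1 line then (acc.1, acc.2.1, 1) else (acc.1 ++ [line], acc.2.1, acc.2.2)
      else if acc.2.2 = 1 then
        if pvIsM2 line then (acc.1, acc.2.1 ++ [line], 2) else acc
      else (acc.1, acc.2.1 ++ [line], acc.2.2) := by
  simp [pvStepA, pvIsM1, pvIsM2]

lemma pvFold_state2 (lines : List (List Char)) (h s : List (List Char)) :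
    lines.foldl pvStepA (h, s, 2) = (h, s ++ lines, 2) := by
  induction lines generalizing s with
  | nil => simp
  | cons l t ih => simp [pvStepA, ih]

lemma pvFold_state1 (lines : List (List Char)) (h s : List (List Char)) :
    lines.foldl pvStepA (h, s, 1) =
      match lines.findIdx? pvIsM2 with
      | none => (h, s, 1)
      | some q => (h, s ++ lines.drop q, 2) := by
  induction lines generalizing s with
  | nil => simp
  | cons l t ih =>
    by_cases hm : pvIsM2 l = true
    · simp [List.findIdx?_cons, hm, pvStepA_eq, pvFold_state2]
    · rw [List.findIdx?_cons]
      simp only [Bool.not_eq_true] at hm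
      simp only [hm, Bool.false_eq_true, if_false]
      have hstep : (l :: t).foldl pvStepA (h, s, 1) = t.foldl pvStepA (h, s, 1) := by
        simp [pvStepA_eq, hm]
      rw [hstep, ih]
      cases hq : t.findIdx? pvIsM2 <;> simp

lemma pvFold_state0 (lines : List (List Char)) (h s : List (List Char)) :
    lines.foldl pvStepA (h, s, 0) =
      match lines.findIdx? pvIsM1 with
      | none => (h ++ lines, s, 0)
      | some p =>
        match (lines.drop (p + 1)).findIdx? pvIsM2 with
        | none => (h ++ lines.take p, s, 1)
        | some q => (h ++ lines.take p, s ++ (lines.drop (p + 1)).drop q, 2) := by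
  induction lines generalizing h with
  | nil => simp
  | cons l t ih =>
    by_cases hm : pvIsM1 l = true
    · have hstep : (l :: t).foldl pvStepA (h, s, 0) = t.foldl pvStepA (h, s, 1) := by
        simp [pvStepA_eq, hm]
      rw [hstep, pvFold_state1, List.findIdx?_cons]
      simp only [hm, if_true]
      cases hq : t.findIdx? pvIsM2 <;> simp [hq]
    · simp only [Bool.not_eq_true] at hm
      have hstep : (l :: t).foldl pvStepA (h, s, 0) = t.foldl pvStepA (h ++ [l], s, 0) := by
        simp [pvStepA_eq, hm]
      rw [hstep, ih, List.findIdx?_cons]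
      simp only [hm, Bool.false_eq_true, if_false]
      cases hp : t.findIdx? pvIsM1 with
      | none => simp
      | some p =>
        cases hq : (t.drop (p + 1)).findIdx? pvIsM2 <;>
          simp [List.take_succ_cons, List.drop_succ_cons, Option.map_some, hq]

-- ===== VERDICT (by name: the statement is the Claim_ definition above) =====
theorem split_template_spec : Claim_equal_split_template := by
  intro fc _
  unfold Spec_split_template split_template split_template_alt
  dsimp only
  rw [pvFold_state0]
  cases hp : (pvSlk fc.toList []).findIdx? pvIsM1 with
  | none =>
    rw [List.nil_append, pvJoin_nil_eq_flatten, pvSlk_flatten]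
    simp [PySem.Chars.join_nil, PySem.Chars.strip, PySem.Chars.lstrip, PySem.Chars.rstrip]
  | some p =>
    dsimp only
    cases hq : ((pvSlk fc.toList []).drop (p + 1)).findIdx? pvIsM2 with
    | none => dsimp only; rw [List.nil_append, PySem.Chars.join_nil]
    | some q =>
      have hd : (pvSlk fc.toList []).drop (p + 1 + q) =
          ((pvSlk fc.toList []).drop (p + 1)).drop q := by
        rw [List.drop_drop]
      dsimp only
      rw [hd, List.nil_append, List.nil_append]
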